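-- pv_equiv track=rewrite | github.com/yaronhayo/i-locksmith-enhanced | analyze_reviews.py | check_duplicate_names
-- ===== SOURCE A (Python) =====
-- from collections import defaultdict, Counter
--
-- def check_duplicate_names(data):
--     """Check for duplicate customer names across pages"""
--     name_to_pages = defaultdict(list)
--
--     for page_path, page_data in data.items():
--         for review in page_data['reviews']:
--             if 'customer_name' in review:
--                 name_to_pages[review['customer_name']].append(page_path)
--
--     duplicates = {name: pages for name, pages in name_to_pages.items() if len(pages) > 1}
--     return duplicates
-- ===== SOURCE B (Python) =====
-- from collections import defaultdict, Counter
--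
-- def check_duplicate_names(data):
--     """Check for duplicate customer names across pages (count pass + selective collect)"""
--     counts = Counter(
--         review['customer_name']
--         for page_data in data.values()
--         for review in page_data['reviews']
--         if 'customer_name' in review
--     )
--     result = defaultdict(list)
--     for page_path, page_data in data.items():
--         for review in page_data['reviews']:
--             if 'customer_name' in review and counts[review['customer_name']] > 1:
--                 result[review['customer_name']].append(page_path)
--     return dict(result)
-- ===== Notes on version B (the rewrite author's own statement) =====
-- stated objective: alternative
-- what changed: Instead of grouping every occurrence into name->pages and filtering the dict afterwards, B flattens reviews into a (name, page) occurrence list, builds a Counter of names once, and then groups only the occurrences of names counted more than once.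
import Mathlib
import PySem

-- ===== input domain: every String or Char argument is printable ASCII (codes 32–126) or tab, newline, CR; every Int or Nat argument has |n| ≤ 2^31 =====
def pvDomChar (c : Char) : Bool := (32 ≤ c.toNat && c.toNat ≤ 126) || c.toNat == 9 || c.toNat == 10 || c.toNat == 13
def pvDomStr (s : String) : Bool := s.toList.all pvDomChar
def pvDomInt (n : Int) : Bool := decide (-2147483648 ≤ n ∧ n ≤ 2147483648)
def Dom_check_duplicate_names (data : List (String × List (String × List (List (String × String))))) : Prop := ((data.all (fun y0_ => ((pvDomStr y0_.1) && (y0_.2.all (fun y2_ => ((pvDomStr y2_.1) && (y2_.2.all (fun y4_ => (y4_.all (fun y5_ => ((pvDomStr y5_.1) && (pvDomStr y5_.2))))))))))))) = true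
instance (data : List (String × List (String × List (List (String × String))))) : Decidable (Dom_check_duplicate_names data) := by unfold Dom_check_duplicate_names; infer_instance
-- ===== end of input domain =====

-- B flattens the reviews to a (name, page) occurrence list, counts names once, and groups only the
-- occurrences of names counted more than once, instead of grouping everything and filtering afterwards
-- (objective: alternative decomposition, same cost).

-- ===== PORT A =====
def check_duplicate_names (data : List (String × List (String × List (List (String × String))))) : List (String × List String) :=
  -- data, page_data and review are Python dicts: PySem.Dict.ofList builds them (first-key position, last value wins)
  let name_to_pages : PySem.Dict String (List String) :=
    (PySem.Dict.ofList data).items.foldl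
      (fun d pp =>
        -- page_data['reviews'] ported in total form via getD; Pre_ guarantees the key is present
        ((PySem.Dict.ofList pp.2).getD "reviews" []).foldl
          (fun d review =>
            if (PySem.Dict.ofList review).contains "customer_name" then
              d.modify ((PySem.Dict.ofList review).getD "customer_name" "") [] (· ++ [pp.1])
            else d)
          d)
      PySem.Dict.empty
  name_to_pages.items.filter (fun p => decide (1 < p.2.length))

-- ===== PORT B =====
-- B-side helper: the (name, page_path) occurrences one page of Source B's comprehension contributes
def pvChunk (pp : String × List (String × List (List (String × String)))) : List (String × String) :=
  ((PySem.Dict.ofList pp.2).getD "reviews" []).filterMap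
    (fun review =>
      if (PySem.Dict.ofList review).contains "customer_name" then
        some ((PySem.Dict.ofList review).getD "customer_name" "", pp.1)
      else none)

def check_duplicate_names_alt (data : List (String × List (String × List (List (String × String))))) : List (String × List String) :=
  let occurrences : List (String × String) := (PySem.Dict.ofList data).items.flatMap pvChunk
  let counts : PySem.Dict String Int := PySem.Dict.counter (occurrences.map (fun o => o.1))
  let result : PySem.Dict String (List String) :=
    occurrences.foldl
      (fun d o => if decide (1 < counts.getD o.1 0) then d.modify o.1 [] (· ++ [o.2]) else d)
      PySem.Dict.empty
  result.items

-- ===== PRECONDITION & SPEC =====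
-- Pre_ excludes exactly the inputs where some page dict (after Python's dict construction) lacks the
-- 'reviews' key: there A (and B) raise KeyError.
def Pre_check_duplicate_names (data : List (String × List (String × List (List (String × String))))) : Prop :=
  ((PySem.Dict.ofList data).values.all (fun pd => pd.any (fun q => q.1 == "reviews"))) = true
instance (data : List (String × List (String × List (List (String × String))))) : Decidable (Pre_check_duplicate_names data) := by unfold Pre_check_duplicate_names; infer_instance

def pvWitness_check_duplicate_names : (List (String × List (String × List (List (String × String))))) :=
  [("p1", [("reviews", [[("customer_name", "bob")]])]),
   ("p2", [("reviews", [[("customer_name", "bob")], [("x", "y")]])])]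

def Spec_check_duplicate_names (data : List (String × List (String × List (List (String × String))))) (out : List (String × List String)) : Prop := out = check_duplicate_names_alt data
instance (data : List (String × List (String × List (List (String × String))))) (out : List (String × List String)) : Decidable (Spec_check_duplicate_names data out) := by unfold Spec_check_duplicate_names; infer_instance

-- ===== CLAIM (what is proved, stated in full; the proofs are below) =====
def Claim_equal_check_duplicate_names : Prop := ∀ (data : List (String × List (String × List (List (String × String))))), Dom_check_duplicate_names data → Pre_check_duplicate_names data → Spec_check_duplicate_names data (check_duplicate_names data)

-- ===== LEMMAS AND PROOFS =====

def pvGroup (l : List (String × String)) : PySem.Dict String (List String) :=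
  l.foldl (fun d o => d.modify o.1 [] (· ++ [o.2])) PySem.Dict.empty

-- A's inner review loop is the grouping fold over the page's occurrence chunk
lemma pv_inner_eq (pp : String × List (String × List (List (String × String))))
    (d : PySem.Dict String (List String)) :
    ((PySem.Dict.ofList pp.2).getD "reviews" []).foldl
      (fun d review =>
        if (PySem.Dict.ofList review).contains "customer_name" then
          d.modify ((PySem.Dict.ofList review).getD "customer_name" "") [] (· ++ [pp.1])
        else d) d
    = (pvChunk pp).foldl (fun d o => d.modify o.1 [] (· ++ [o.2])) d := by
  unfold pvChunk
  generalize (PySem.Dict.ofList pp.2).getD "reviews" [] = reviews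
  induction reviews generalizing d with
  | nil => rfl
  | cons r rs ih =>
    by_cases h : (PySem.Dict.ofList r).contains "customer_name" = true
    · simp [h, ih]
    · simp only [Bool.not_eq_true] at h
      simp [h, ih]

-- a fold of per-chunk folds is the fold over the flattened list
lemma pv_foldl_flatMap {α β : Type} (f : α → List (String × String))
    (g : β → String × String → β) (l : List α) (d : β) :
    l.foldl (fun d x => (f x).foldl g d) d = (l.flatMap f).foldl g d := by
  induction l generalizing d with
  | nil => rfl
  | cons x xs ih => simp [List.flatMap_cons, List.foldl_append, ih]

-- first-occurrence dedup commutes with filter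
lemma pv_foldl_add_filter {α : Type} [BEq α] [LawfulBEq α] (p : α → Bool) (xs acc : List α) :
    List.foldl PySem.Set.add (acc.filter p) (xs.filter p)
      = (List.foldl PySem.Set.add acc xs).filter p := by
  induction xs generalizing acc with
  | nil => rfl
  | cons x xs ih =>
    simp only [List.filter_cons, List.foldl_cons]
    by_cases hp : p x = true
    · rw [if_pos hp]
      simp only [List.foldl_cons]
      have hadd : PySem.Set.add (List.filter p acc) x = List.filter p (PySem.Set.add acc x) := by
        by_cases hm : x ∈ acc
        · simp [PySem.Set.add, List.mem_filter, hm, hp]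
        · simp [PySem.Set.add, List.mem_filter, hm, hp, List.filter_append]
      rw [hadd]
      exact ih (PySem.Set.add acc x)
    · rw [if_neg hp]
      have hadd : List.filter p (PySem.Set.add acc x) = List.filter p acc := by
        simp only [Bool.not_eq_true] at hp
        by_cases hm : x ∈ acc
        · simp [PySem.Set.add, hm]
        · simp [PySem.Set.add, hm, List.filter_append, hp]
      rw [← ih (PySem.Set.add acc x), hadd]

lemma pv_set_ofList_filter {α : Type} [BEq α] [LawfulBEq α] (p : α → Bool) (xs : List α) :
    PySem.Set.ofList (xs.filter p) = (PySem.Set.ofList xs).filter p :=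
  pv_foldl_add_filter p xs []

lemma pvGroup_keys (l : List (String × String)) :
    (pvGroup l).keys = PySem.Set.ofList (l.map (·.1)) := by
  unfold pvGroup
  rw [PySem.Dict.keys_foldl_modify_key l (fun o => o.1) [] (fun _ o v => v ++ [o.2])]
  rfl

lemma pvGroup_nodup (l : List (String × String)) : (pvGroup l).keys.Nodup := by
  unfold pvGroup
  exact PySem.Dict.nodup_keys_foldl_modify_key l (fun o => o.1) [] (fun _ o v => v ++ [o.2])
    PySem.Dict.empty (by simp)

lemma pvGroup_getD (l : List (String × String)) (c : String) :
    (pvGroup l).getD c [] = (l.filter (fun o => o.1 == c)).map (·.2) := by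
  unfold pvGroup
  rw [PySem.Dict.getD_foldl_modify_append l PySem.Dict.empty c]
  simp [PySem.Dict.getD_empty]

lemma pvGroup_items (l : List (String × String)) :
    (pvGroup l).items
      = (PySem.Set.ofList (l.map (·.1))).map
          (fun k => (k, (l.filter (fun o => o.1 == k)).map (·.2))) := by
  rw [PySem.Dict.items_eq_map_keys (pvGroup l) (pvGroup_nodup l) []]
  rw [pvGroup_keys]
  exact List.map_congr_left (fun k _ => by rw [pvGroup_getD])

-- the core: filtering the grouped dict = grouping the pre-filtered occurrences
lemma pv_core (l : List (String × String)) :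
    (pvGroup l).items.filter (fun p => decide (1 < p.2.length))
      = (pvGroup (l.filter (fun o => decide (1 < (l.map (·.1)).count o.1)))).items := by
  set q : String → Bool := fun n => decide (1 < (l.map (·.1)).count n) with hqdef
  set l' : List (String × String) := l.filter (fun o => q o.1) with hl'
  have hmap : l'.map (·.1) = (l.map (·.1)).filter q := by
    rw [hl', List.filter_map]
    rfl
  rw [pvGroup_items, pvGroup_items]
  rw [List.filter_map, hmap, pv_set_ofList_filter]
  have hpred : ∀ k,
      ((fun p => decide (1 < p.2.length)) ∘ (fun k => (k, (l.filter (fun o => o.1 == k)).map (·.2)))) k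
        = q k := by
    intro k
    have hcnt : (l.map (·.1)).count k = (l.filter (fun o => o.1 == k)).length := by
      rw [List.count_eq_countP, List.countP_map, List.countP_eq_length_filter]
      rfl
    simp [Function.comp, hqdef, hcnt]
  rw [List.filter_congr (fun k _ => hpred k)]
  refine List.map_congr_left (fun k hk => ?_)
  have hqk : q k = true := (List.mem_filter.mp hk).2
  have hfix : List.filter (fun o => o.1 == k) l' = List.filter (fun o => o.1 == k) l := by
    rw [hl', List.filter_comm]
    exact List.filter_eq_self.mpr (fun o ho => by
      have hok : o.1 = k := by simpa using (List.mem_filter.mp ho).2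
      rw [hok]; exact hqk)
  rw [hfix]

lemma pvA_eq (data : List (String × List (String × List (List (String × String))))) :
    check_duplicate_names data
      = (pvGroup ((PySem.Dict.ofList data).items.flatMap pvChunk)).items.filter
          (fun p => decide (1 < p.2.length)) := by
  simp only [check_duplicate_names]
  congr 1
  rw [List.foldl_ext _
    (fun d pp => (pvChunk pp).foldl (fun d o => d.modify o.1 [] (· ++ [o.2])) d)
    PySem.Dict.empty (fun d pp _ => pv_inner_eq pp d)]
  unfold pvGroup
  rw [← pv_foldl_flatMap pvChunk]

lemma pvB_eq (data : List (String × List (String × List (List (String × String))))) :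
    check_duplicate_names_alt data
      = (pvGroup (((PySem.Dict.ofList data).items.flatMap pvChunk).filter
          (fun o => decide (1 < (((PySem.Dict.ofList data).items.flatMap pvChunk).map (·.1)).count o.1)))).items := by
  simp only [check_duplicate_names_alt]
  unfold pvGroup
  rw [List.foldl_filter]
  refine congrArg PySem.Dict.items ?_
  refine List.foldl_ext _ _ PySem.Dict.empty (fun d o _ => ?_)
  rw [PySem.Dict.getD_counter]
  norm_num

-- ===== VERDICT (by name: the statement is the Claim_ definition above) =====
theorem check_duplicate_names_spec : Claim_equal_check_duplicate_names := by
  intro data _ _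
  unfold Spec_check_duplicate_names
  rw [pvA_eq, pvB_eq, pv_core]
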